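-- pv_equiv track=rewrite | github.com/yoonseong00/algo | programmers/레벨1/문자열내림차순정렬/sol.py | solution
-- ===== SOURCE A (Python) =====
-- def solution(s):
--
--     answer = []
--
--     eng = list(s)
--
--     dae = []
--     so = []
--
--
--     for i in eng:
--         if i.isupper():
--             dae.append(i)
--         else:
--             so.append(i)
--
--     a = sorted(dae, reverse = True)
--     b = sorted(so, reverse = True)
--
--
--     answer = b + a
--
--     return ''.join(answer)
-- ===== SOURCE B (Python) =====
-- def solution(s):
--     # counting sort over the ASCII alphabet: O(n + 128) instead of O(n log n)
--     counts = [0] * 128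
--     for ch in s:
--         counts[ord(ch)] += 1
--     parts = []
--     for code in range(126, 8, -1):          # all domain chars, descending
--         if not (65 <= code <= 90):          # non-uppercase first
--             parts.append(chr(code) * counts[code])
--     for code in range(90, 64, -1):          # then uppercase, descending
--         parts.append(chr(code) * counts[code])
--     return ''.join(parts)
-- ===== Notes on version B (the rewrite author's own statement) =====
-- stated objective: faster
-- what changed: Replaces the per-class sorted(..., reverse=True) calls by a counting sort: one pass tallies characters into a 128-slot ASCII table, then the result is emitted by scanning codes in descending order (non-uppercase first, then uppercase).
import Mathlib
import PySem

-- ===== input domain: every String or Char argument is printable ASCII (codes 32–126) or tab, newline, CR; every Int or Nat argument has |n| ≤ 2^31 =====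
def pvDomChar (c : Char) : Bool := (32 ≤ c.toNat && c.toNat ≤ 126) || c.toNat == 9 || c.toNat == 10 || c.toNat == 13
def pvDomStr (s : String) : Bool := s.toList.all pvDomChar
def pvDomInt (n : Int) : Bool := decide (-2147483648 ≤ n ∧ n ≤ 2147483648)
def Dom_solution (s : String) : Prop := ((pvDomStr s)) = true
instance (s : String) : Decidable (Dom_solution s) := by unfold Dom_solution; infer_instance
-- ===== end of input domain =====

-- B replaces A's two sorted() calls by a counting sort over the fixed 128-slot ASCII table, emitted in descending code order.


-- ===== PORT A =====
def solution (s : String) : String :=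
  let eng := s.toList
  let ds := eng.foldl
    (fun (acc : List Char × List Char) i =>
      if PySem.Chars.isupper i = true then (acc.1 ++ [i], acc.2) else (acc.1, acc.2 ++ [i]))
    ([], [])
  let a := PySem.List.sorted ds.1 (fun x => x) true
  let b := PySem.List.sorted ds.2 (fun x => x) true
  let answer := b ++ a
  String.mk (PySem.Chars.join [] (answer.map (fun c => [c])))

-- ===== PORT B =====
-- counts[ord(ch)] += 1 over the 128-slot table
def pvBump (counts : List Nat) (ch : Char) : List Nat :=
  counts.set ch.toNat (counts.getD ch.toNat 0 + 1)

def solution_alt (s : String) : String :=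
  let counts := s.toList.foldl pvBump (List.replicate 128 0)
  let parts1 := (PySem.List.pyRange 126 8 (-1)).foldl
    (fun (parts : List (List Char)) code =>
      if ¬ (65 ≤ code ∧ code ≤ 90) then
        parts ++ [List.replicate (counts.getD code.toNat 0) (Char.ofNat code.toNat)]
      else parts) []
  let parts := (PySem.List.pyRange 90 64 (-1)).foldl
    (fun (parts : List (List Char)) code =>
      parts ++ [List.replicate (counts.getD code.toNat 0) (Char.ofNat code.toNat)]) parts1
  String.mk (PySem.Chars.join [] parts)

-- ===== PRECONDITION & SPEC =====
def Spec_solution (s : String) (out : String) : Prop := out = solution_alt s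
instance (s : String) (out : String) : Decidable (Spec_solution s out) := by unfold Spec_solution; infer_instance

-- ===== CLAIM (what is proved, stated in full; the proofs are below) =====
def Claim_equal_solution : Prop := ∀ (s : String), Dom_solution s → Spec_solution s (solution s)

-- ===== LEMMAS AND PROOFS =====

-- Char/code bridges
theorem pvCharLe (a b : Char) : a ≤ b ↔ a.toNat ≤ b.toNat := by
  rw [Char.le_def]; exact UInt32.le_iff_toNat_le ..

theorem pvToNat_ofNat (n : Nat) (h : n < 128) : (Char.ofNat n).toNat = n := by
  rw [Char.toNat_ofNat, if_pos (Or.inl (by omega))]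

theorem pvToNat_inj (a b : Char) (h : a.toNat = b.toNat) : a = b := by
  have := congrArg Char.ofNat h
  rwa [Char.ofNat_toNat, Char.ofNat_toNat] at this

theorem pvIsupperIff (c : Char) : PySem.Chars.isupper c = true ↔ (65 ≤ c.toNat ∧ c.toNat ≤ 90) := by
  simp [PySem.Chars.isupper, pvCharLe 'A' c, pvCharLe c 'Z']

-- A's partition loop
theorem pvSplit (cs : List Char) (d0 s0 : List Char) :
    cs.foldl
      (fun (acc : List Char × List Char) i =>
        if PySem.Chars.isupper i = true then (acc.1 ++ [i], acc.2) else (acc.1, acc.2 ++ [i]))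
      (d0, s0)
    = (d0 ++ cs.filter (fun c => PySem.Chars.isupper c),
       s0 ++ cs.filter (fun c => ! PySem.Chars.isupper c)) := by
  induction cs generalizing d0 s0 with
  | nil => simp
  | cons c t ih =>
    by_cases h : PySem.Chars.isupper c = true <;> simp [h, ih]

-- B's counting loop
theorem pvCounts (cs : List Char) (L : List Nat) (n : Nat)
    (hn : n < L.length) (hn128 : n < 128) (hcs : ∀ c ∈ cs, c.toNat < L.length) :
    (cs.foldl pvBump L).getD n 0 = L.getD n 0 + cs.count (Char.ofNat n) := by
  induction cs generalizing L with
  | nil => simp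
  | cons c t ih =>
    have hlen : (pvBump L c).length = L.length := by simp [pvBump]
    have hstep : (pvBump L c).getD n 0
        = L.getD n 0 + (if c = Char.ofNat n then 1 else 0) := by
      by_cases hc : c.toNat = n
      · have hceq : c = Char.ofNat n := by rw [← hc, Char.ofNat_toNat]
        have hcn : (Char.ofNat n).toNat = n := pvToNat_ofNat n hn128
        simp [pvBump, List.getD_eq_getElem?_getD, hceq, hcn, List.getElem?_set_self hn]
      · have hcne : c ≠ Char.ofNat n := by
          intro h; apply hc; rw [h, pvToNat_ofNat n hn128]
        simp [pvBump, List.getD_eq_getElem?_getD, List.getElem?_set_ne hc, hcne]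
    rw [List.foldl_cons,
        ih (pvBump L c) (hlen ▸ hn)
          (fun c' hc' => hlen ▸ hcs c' (List.mem_cons_of_mem _ hc')),
        hstep, List.count_cons]
    by_cases hq : c = Char.ofNat n <;> simp [hq] <;> omega

-- B's conditional emission loop
theorem pvEmit (codes : List Int) (p : Int → Prop) [DecidablePred p]
    (f : Int → List Char) (init : List (List Char)) :
    codes.foldl (fun (parts : List (List Char)) code =>
      if p code then parts ++ [f code] else parts) init
    = init ++ (codes.filter (fun c => decide (p c))).map f := by
  induction codes generalizing init with
  | nil => simp
  | cons c t ih =>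
    by_cases h : p c <;> simp [h, ih]

-- ''.join of a list of pieces is flatten
theorem pvJoinNil (parts : List (List Char)) : PySem.Chars.join [] parts = parts.flatten := by
  induction parts with
  | nil => simp [PySem.Chars.join, List.intercalate]
  | cons x t ih =>
    cases t with
    | nil => simp [PySem.Chars.join, List.intercalate]
    | cons y u => rw [PySem.Chars.join_cons_cons]; simp only [List.flatten_cons, ← ih]; simp

-- count of a char across the replicate-blocks of distinct in-range codes
theorem pvCountBlocks (a : Char) (xs : List Char) (codes : List Int)
    (hnd : codes.Pairwise (· ≠ ·)) (hrange : ∀ k ∈ codes, 0 ≤ k ∧ k < 128) :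
    (codes.map (fun k =>
        List.count a (List.replicate (xs.count (Char.ofNat k.toNat)) (Char.ofNat k.toNat)))).sum
    = if (a.toNat : Int) ∈ codes then xs.count a else 0 := by
  induction codes with
  | nil => simp
  | cons k rest ih =>
    have hk := hrange k (List.mem_cons_self ..)
    have hrest : ∀ k' ∈ rest, 0 ≤ k' ∧ k' < 128 :=
      fun k' h => hrange k' (List.mem_cons_of_mem _ h)
    rw [List.map_cons, List.sum_cons, ih hnd.of_cons hrest, List.count_replicate]
    by_cases hak : k = (a.toNat : Int)
    · have hkn : k.toNat = a.toNat := by omega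
      have hchr : Char.ofNat k.toNat = a := by rw [hkn, Char.ofNat_toNat]
      have hnot : (a.toNat : Int) ∉ rest := by
        rw [← hak]; exact fun hm => (List.rel_of_pairwise_cons hnd hm) rfl
      have hmem : (a.toNat : Int) ∈ k :: rest := by
        rw [← hak]; exact List.mem_cons_self ..
      simp [hchr, hmem, hnot]
    · have hchr : (Char.ofNat k.toNat == a) = false := by
        simp only [beq_eq_false_iff_ne, ne_eq]
        intro h
        apply hak
        have : k.toNat = a.toNat := by rw [← h, pvToNat_ofNat k.toNat (by omega)]
        omega
      have hmem : ((a.toNat : Int) ∈ k :: rest) ↔ ((a.toNat : Int) ∈ rest) := by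
        simp only [List.mem_cons, or_iff_right_iff_imp]
        intro h; exact absurd h.symm hak
      simp [hchr, hmem]

-- the core: sorted(xs, reverse=True) equals the descending counting-sort emission
theorem pvSortedEqBlocks (xs : List Char) (codes : List Int)
    (hdesc : codes.Pairwise (· > ·))
    (hrange : ∀ k ∈ codes, 0 ≤ k ∧ k < 128)
    (hxs : ∀ c ∈ xs, (c.toNat : Int) ∈ codes) :
    PySem.List.sorted xs (fun x => x) true
    = (codes.map (fun k =>
        List.replicate (xs.count (Char.ofNat k.toNat)) (Char.ofNat k.toNat))).flatten := by
  have hchr : ∀ k ∈ codes, (((Char.ofNat k.toNat).toNat : Int)) = k := by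
    intro k hk
    have h := hrange k hk
    rw [pvToNat_ofNat k.toNat (by omega)]
    omega
  apply PySem.List.eq_of_perm_of_pairwise_le_of_injective (fun c : Char => -(c.toNat : Int))
  · intro a b h
    simp only [neg_inj, Nat.cast_inj] at h
    exact pvToNat_inj a b h
  · rw [List.perm_iff_count]
    intro a
    rw [(PySem.List.sorted_perm xs (fun x => x) true).count_eq a,
        ← List.flatMap_def, List.count_flatMap]
    simp only [Function.comp_def]
    rw [pvCountBlocks a xs codes (hdesc.imp (fun h => ne_of_gt h)) hrange]
    split
    · rfl
    · next hmem => exact (List.count_eq_zero.mpr (fun hm => hmem (hxs a hm)))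
  · exact (PySem.List.sorted_pairwise_rev xs (fun x => x)).imp
      (fun {a b} h => by
        have := (pvCharLe b a).mp h
        omega)
  · rw [List.pairwise_flatten]
    constructor
    · intro l hl
      simp only [List.mem_map] at hl
      obtain ⟨k, _, rfl⟩ := hl
      exact List.pairwise_replicate.mpr (Or.inr le_rfl)
    · rw [List.pairwise_map]
      refine hdesc.imp_of_mem (fun {k1 k2} h1 h2 hgt => ?_)
      intro x hx y hy
      rw [List.eq_of_mem_replicate hx, List.eq_of_mem_replicate hy]
      have e1 := hchr k1 h1
      have e2 := hchr k2 h2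
      omega

-- the counting table read back, on in-range codes
theorem pvCountsEng (cs : List Char) (k : Int) (h0 : 0 ≤ k) (h128 : k < 128)
    (hcs : ∀ c ∈ cs, c.toNat < 128) :
    (cs.foldl pvBump (List.replicate 128 0)).getD k.toNat 0
      = cs.count (Char.ofNat k.toNat) := by
  rw [pvCounts cs (List.replicate 128 0) k.toNat (by simp; omega) (by omega)
        (by simpa using hcs)]
  have hz : (List.replicate 128 (0 : Nat)).getD k.toNat 0 = 0 := by
    rw [List.getD_eq_getElem?_getD, List.getElem?_replicate]
    split <;> rfl
  rw [hz, Nat.zero_add]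

-- descending ranges are strictly decreasing
theorem pvDescRange (a b : Int) : (PySem.List.pyRange a b (-1)).Pairwise (· > ·) := by
  rw [PySem.List.pyRange_neg_one, List.pairwise_map]
  exact List.pairwise_lt_range.imp (fun h => by omega)

-- ===== VERDICT (by name: the statement is the Claim_ definition above) =====
theorem solution_spec : Claim_equal_solution := by
  intro s hdom
  unfold Dom_solution pvDomStr at hdom
  have hdomc : ∀ c ∈ s.toList, 8 < c.toNat ∧ c.toNat ≤ 126 := by
    intro c hc
    have := (List.all_eq_true.mp hdom) c hc
    simp [pvDomChar] at this
    omega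
  unfold Spec_solution solution solution_alt
  simp only []
  rw [pvSplit s.toList [] []]
  simp only [List.nil_append]
  rw [pvEmit (PySem.List.pyRange 126 8 (-1)) (fun code => ¬(65 ≤ code ∧ code ≤ 90)) _ [],
      PySem.List.foldl_append_singleton_eq_map,
      PySem.Chars.join_nil_singletons, pvJoinNil, List.nil_append,
      List.flatten_append]
  refine congrArg String.mk ?_
  have hlt128 : ∀ c ∈ s.toList, c.toNat < 128 := fun c hc => by
    have := hdomc c hc; omega
  congr 1
  · -- lowercase/other part
    set so := s.toList.filter (fun c => ! PySem.Chars.isupper c) with hso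
    set codes1 := (PySem.List.pyRange 126 8 (-1)).filter
      (fun c => decide ¬(65 ≤ c ∧ c ≤ 90)) with hcodes1
    have hrange1 : ∀ k ∈ codes1, 0 ≤ k ∧ k < 128 := by
      intro k hk
      have := PySem.List.mem_pyRange_neg_one.mp (List.mem_of_mem_filter hk)
      omega
    have hcongr : ∀ k ∈ codes1,
        List.replicate ((s.toList.foldl pvBump (List.replicate 128 0)).getD k.toNat 0)
          (Char.ofNat k.toNat)
        = List.replicate (so.count (Char.ofNat k.toNat)) (Char.ofNat k.toNat) := by
      intro k hk
      have hr := hrange1 k hk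
      have hd := List.of_mem_filter (p := fun c => decide ¬(65 ≤ c ∧ c ≤ 90)) hk
      have hnp : ¬(65 ≤ k ∧ k ≤ 90) := of_decide_eq_true hd
      have hup : (! PySem.Chars.isupper (Char.ofNat k.toNat)) = true := by
        simp only [Bool.not_eq_true', ← Bool.not_eq_true]
        intro h
        have := (pvIsupperIff (Char.ofNat k.toNat)).mp h
        rw [pvToNat_ofNat k.toNat (by omega)] at this
        omega
      rw [pvCountsEng s.toList k hr.1 hr.2 hlt128, hso,
          List.count_filter (p := fun c => ! PySem.Chars.isupper c) hup]
    rw [List.map_congr_left hcongr]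
    refine pvSortedEqBlocks so codes1 ((pvDescRange 126 8).filter _) hrange1 ?_
    intro c hc
    have hmem := List.mem_of_mem_filter hc
    have hcls := List.of_mem_filter hc
    have hb := hdomc c hmem
    have hnotup : ¬(65 ≤ c.toNat ∧ c.toNat ≤ 90) := by
      intro h
      have : PySem.Chars.isupper c = true := (pvIsupperIff c).mpr h
      simp [this] at hcls
    refine List.mem_filter.mpr ⟨PySem.List.mem_pyRange_neg_one.mpr (by omega), ?_⟩
    simp only [decide_eq_true_eq]
    omega
  · -- uppercase part
    set dae := s.toList.filter (fun c => PySem.Chars.isupper c) with hdae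
    have hrange2 : ∀ k ∈ PySem.List.pyRange 90 64 (-1), 0 ≤ k ∧ k < 128 := by
      intro k hk
      have := PySem.List.mem_pyRange_neg_one.mp hk
      omega
    have hcongr : ∀ k ∈ PySem.List.pyRange 90 64 (-1),
        List.replicate ((s.toList.foldl pvBump (List.replicate 128 0)).getD k.toNat 0)
          (Char.ofNat k.toNat)
        = List.replicate (dae.count (Char.ofNat k.toNat)) (Char.ofNat k.toNat) := by
      intro k hk
      have hr := PySem.List.mem_pyRange_neg_one.mp hk
      have hup : PySem.Chars.isupper (Char.ofNat k.toNat) = true := by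
        refine (pvIsupperIff (Char.ofNat k.toNat)).mpr ?_
        rw [pvToNat_ofNat k.toNat (by omega)]
        omega
      rw [pvCountsEng s.toList k (by omega) (by omega) hlt128, hdae,
          List.count_filter (p := fun c => PySem.Chars.isupper c) hup]
    rw [List.map_congr_left hcongr]
    refine pvSortedEqBlocks dae (PySem.List.pyRange 90 64 (-1))
      (pvDescRange 90 64) hrange2 ?_
    intro c hc
    have hcls := List.of_mem_filter hc
    have hup := (pvIsupperIff c).mp hcls
    exact PySem.List.mem_pyRange_neg_one.mpr (by omega)
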